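-- pv_equiv track=rewrite | github.com/caiolmart/leetcode_exercises | longestPalindrome.py | longest_for_offset
-- ===== SOURCE A (Python) =====
-- def longest_for_offset(s, s_inv, offset):
--     if offset >= 0:
--         this_s = s[offset:]
--         this_s_inv = s_inv[:-offset] or s_inv # goes null for offset=0
--     else:
--         this_s = s[:offset]
--         this_s_inv = s_inv[-offset:]
--     comp_list = [a == b for a, b in  zip(this_s, this_s_inv)]
--     if all(comp_list):
--         return this_s
--
--     for remove_n in range(1, len(comp_list)//2 + len(comp_list)%2):
--         if all(comp_list[remove_n: -remove_n]):
--             return this_s[remove_n: -remove_n]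
--     return ''
-- ===== SOURCE B (Python) =====
-- def longest_for_offset(s, s_inv, offset):
--     if offset >= 0:
--         this_s = s[offset:]
--         this_s_inv = s_inv[:-offset] or s_inv
--     else:
--         this_s = s[:offset]
--         this_s_inv = s_inv[-offset:]
--     m = min(len(this_s), len(this_s_inv))
--     # minimal symmetric trim k: for every mismatch position i the trim must
--     # satisfy k >= i+1 or k >= m-i, hence k = max over mismatches of min(i+1, m-i)
--     k = 0
--     for i, (a, b) in enumerate(zip(this_s, this_s_inv)):
--         if a != b:
--             cand = min(i + 1, m - i)
--             if cand > k:
--                 k = cand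
--     if k == 0:
--         return this_s
--     if k < m // 2 + m % 2:
--         return this_s[k:len(this_s) - k]
--     return ''
-- ===== Notes on version B (the rewrite author's own statement) =====
-- stated objective: faster
-- what changed: Instead of trying every trim width and re-scanning the slice (quadratic), B computes the minimal symmetric trim in one pass as the running maximum of min(i+1, m-i) over mismatch positions.
import Mathlib
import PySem

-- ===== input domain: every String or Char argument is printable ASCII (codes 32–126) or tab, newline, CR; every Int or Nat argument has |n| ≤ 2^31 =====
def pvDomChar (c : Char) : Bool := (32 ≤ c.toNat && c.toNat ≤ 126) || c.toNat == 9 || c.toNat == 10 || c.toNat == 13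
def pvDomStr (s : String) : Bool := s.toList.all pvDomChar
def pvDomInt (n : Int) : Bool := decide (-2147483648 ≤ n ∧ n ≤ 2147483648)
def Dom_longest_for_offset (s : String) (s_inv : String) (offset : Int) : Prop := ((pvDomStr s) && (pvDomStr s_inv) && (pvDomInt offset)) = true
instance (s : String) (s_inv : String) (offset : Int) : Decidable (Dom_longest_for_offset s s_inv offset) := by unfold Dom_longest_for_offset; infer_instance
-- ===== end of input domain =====

-- B replaces A's quadratic try-every-trim loop by a single pass computing the minimal
-- symmetric trim as a running maximum of min(i+1, m-i) over the mismatch positions (objective: faster, O(n)).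

-- ===== PORT A =====
-- A's for-loop over range(1, len//2 + len%2), trying each trim width in order
def pvLoopA (this_s : List Char) (comp : List Bool) : List Int → String
  | [] => ""
  | r :: rest =>
    if (PySem.List.slice comp (some r) (some (-r))).all id then
      String.ofList (PySem.List.slice this_s (some r) (some (-r)))
    else pvLoopA this_s comp rest

-- A's body after this_s / this_s_inv are computed
def pvAcore (this_s : List Char) (this_s_inv : List Char) : String :=
  let comp := (this_s.zip this_s_inv).map (fun p => p.1 == p.2)
  if comp.all id then String.ofList this_s
  else pvLoopA this_s comp (PySem.List.pyRange 1 (PySem.Int.floordiv (comp.length : Int) 2 + PySem.Int.mod (comp.length : Int) 2) 1)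

def longest_for_offset (s : String) (s_inv : String) (offset : Int) : String :=
  let sl := s.toList
  let il := s_inv.toList
  if offset ≥ 0 then
    let this_s := PySem.List.slice sl (some offset) none
    let t := PySem.List.slice il none (some (-offset))
    let this_s_inv := if t = [] then il else t        -- `s_inv[:-offset] or s_inv`
    pvAcore this_s this_s_inv
  else
    let this_s := PySem.List.slice sl none (some offset)
    let this_s_inv := PySem.List.slice il (some (-offset)) none
    pvAcore this_s this_s_inv

-- ===== PORT B =====
-- B's body after this_s / this_s_inv are computed: one pass over enumerate(zip(..)),
-- keeping the running maximum k of min(i+1, m-i) over mismatch positions i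
def pvBcore (this_s : List Char) (this_s_inv : List Char) : String :=
  let m : Int := ((min this_s.length this_s_inv.length : Nat) : Int)
  let k := (PySem.List.enumerate (this_s.zip this_s_inv) 0).foldl
      (fun k p => if p.2.1 != p.2.2 then
          (let cand := min (p.1 + 1) (m - p.1); if cand > k then cand else k)
        else k) 0
  if k = 0 then String.ofList this_s
  else if k < PySem.Int.floordiv m 2 + PySem.Int.mod m 2 then
    String.ofList (PySem.List.slice this_s (some k) (some ((this_s.length : Int) - k)))
  else ""

def longest_for_offset_alt (s : String) (s_inv : String) (offset : Int) : String :=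
  let sl := s.toList
  let il := s_inv.toList
  if offset ≥ 0 then
    let this_s := PySem.List.slice sl (some offset) none
    let t := PySem.List.slice il none (some (-offset))
    let this_s_inv := if t = [] then il else t
    pvBcore this_s this_s_inv
  else
    let this_s := PySem.List.slice sl none (some offset)
    let this_s_inv := PySem.List.slice il (some (-offset)) none
    pvBcore this_s this_s_inv

-- ===== PRECONDITION & SPEC =====
def Spec_longest_for_offset (s : String) (s_inv : String) (offset : Int) (out : String) : Prop := out = longest_for_offset_alt s s_inv offset
instance (s : String) (s_inv : String) (offset : Int) (out : String) : Decidable (Spec_longest_for_offset s s_inv offset out) := by unfold Spec_longest_for_offset; infer_instance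

-- ===== CLAIM (what is proved, stated in full; the proofs are below) =====
def Claim_equal_longest_for_offset : Prop := ∀ (s : String) (s_inv : String) (offset : Int), Dom_longest_for_offset s s_inv offset → Spec_longest_for_offset s s_inv offset (longest_for_offset s s_inv offset)

-- ===== LEMMAS AND PROOFS =====

-- the list of "required trim" candidates min(i+1, m-i), one per mismatch position i
def pvCands (z : List (Char × Char)) (m : Int) (s : Int) : List Int :=
  (PySem.List.enumerate z s).filterMap
    (fun p => if p.2.1 != p.2.2 then some (min (p.1 + 1) (m - p.1)) else none)

lemma pvFold_eq_max (z : List (Char × Char)) (m : Int) :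
    ∀ (s acc : Int),
      (PySem.List.enumerate z s).foldl
        (fun k p => if p.2.1 != p.2.2 then
            (let cand := min (p.1 + 1) (m - p.1); if cand > k then cand else k)
          else k) acc
      = (pvCands z m s).foldl max acc := by
  induction z with
  | nil => intro s acc; simp [pvCands, PySem.List.enumerate_nil]
  | cons x xs ih =>
    intro s acc
    have ih2 := ih (s + 1)
    simp only [pvCands, PySem.List.enumerate_cons, List.filterMap_cons, List.foldl_cons] at ih2 ⊢
    by_cases h : (x.1 != x.2) = true
    · simp only [if_pos h, List.foldl_cons]
      rw [ih2]
      congr 1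
      split_ifs <;> omega
    · simp only [if_neg h]
      exact ih2 acc

lemma pvFoldMax_le_iff (l : List Int) : ∀ (acc K : Int),
    l.foldl max acc ≤ K ↔ acc ≤ K ∧ ∀ c ∈ l, c ≤ K := by
  induction l with
  | nil => intro acc K; simp
  | cons x xs ih =>
    intro acc K
    simp only [List.foldl_cons, ih, List.mem_cons]
    constructor
    · rintro ⟨h1, h2⟩
      refine ⟨by omega, fun c hc => ?_⟩
      rcases hc with rfl | hc
      · omega
      · exact h2 c hc
    · rintro ⟨h1, h2⟩
      exact ⟨by have := h2 x (Or.inl rfl); omega, fun c hc => h2 c (Or.inr hc)⟩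

lemma pvMem_cands (z : List (Char × Char)) (m c : Int) :
    c ∈ pvCands z m 0 ↔ ∃ (k : Nat) (h : k < z.length),
      (z[k].1 != z[k].2) = true ∧ c = min ((k : Int) + 1) (m - k) := by
  simp only [pvCands, List.mem_filterMap, PySem.List.mem_enumerate_iff]
  constructor
  · rintro ⟨p, ⟨k, hk, rfl⟩, hp⟩
    by_cases h : (z[k].1 != z[k].2) = true
    · refine ⟨k, hk, h, ?_⟩
      simp only [h, if_pos] at hp
      simp only [zero_add] at hp ⊢
      exact (Option.some_inj.mp hp).symm
    · simp [h] at hp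
  · rintro ⟨k, hk, h, rfl⟩
    exact ⟨(0 + (k : Int), z[k]), ⟨k, hk, rfl⟩, by simp [h]⟩

-- the slice comp[r:-r] written as drop/take
lemma pvSlice_pos_neg {α : Type} (xs : List α) (r : Nat) (hr : 0 < r) :
    PySem.List.slice xs (some (r : Int)) (some (-(r : Int)))
      = (xs.drop r).take (xs.length - r - min r xs.length) := by
  simp only [PySem.List.slice, PySem.List.clampIdx]
  have h1 : ¬ ((r : Int) < 0) := by omega
  have h2 : -(r : Int) < 0 := by omega
  simp only [h1, if_false, h2, if_true]
  by_cases h3 : (xs.length : Int) + -(r : Int) < 0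
  · simp only [h3, if_true]
    have hd : min (r : Int).toNat xs.length = xs.length := by omega
    rw [hd, List.drop_length]
    have h4 : xs.length - r - min r xs.length = 0 := by omega
    simp [h4]
  · simp only [h3, if_false]
    have hd : min (r : Int).toNat xs.length = r := by omega
    rw [hd]
    congr 1
    omega

-- all-true of a drop/take slice, elementwise
lemma pvAll_take_drop (xs : List Bool) (r q : Nat) :
    ((xs.drop r).take q).all id = true ↔
      ∀ (k : Nat) (h : k < xs.length), r ≤ k → k < r + q → xs[k] = true := by
  rw [List.all_eq_true]
  constructor
  · intro h k hk h1 h2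
    have hlt : k - r < ((xs.drop r).take q).length := by
      simp only [List.length_take, List.length_drop]
      omega
    have he : ((xs.drop r).take q)[k - r] = xs[k] := by
      rw [List.getElem_take, List.getElem_drop]
      congr 1
      omega
    have hx := h _ (List.getElem_mem hlt)
    rwa [he] at hx
  · intro h x hx
    obtain ⟨i, hi, rfl⟩ := List.mem_iff_getElem.mp hx
    have hi2 : i < q ∧ i < xs.length - r := by
      simpa [List.length_take, List.length_drop] using hi
    have he : ((xs.drop r).take q)[i] = xs[r + i]'(by omega) := by
      rw [List.getElem_take, List.getElem_drop]
    rw [he]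
    exact h (r + i) (by omega) (by omega) (by omega)

-- A's slice test comp[r:-r]-all-true says exactly that every candidate is at most r
lemma pvP_iff (z : List (Char × Char)) (r : Nat) (hr : 0 < r) :
    ((PySem.List.slice (z.map (fun p => p.1 == p.2)) (some (r : Int)) (some (-(r : Int)))).all id = true)
      ↔ ∀ c ∈ pvCands z (z.length : Int) 0, c ≤ (r : Int) := by
  rw [pvSlice_pos_neg _ r hr, pvAll_take_drop]
  constructor
  · intro h c hc
    rw [pvMem_cands] at hc
    obtain ⟨k, hk, hmis, rfl⟩ := hc
    by_contra hlt
    simp only [List.length_map] at h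
    have hcomp := h k hk (by omega) (by omega)
    simp only [List.getElem_map] at hcomp
    simp [bne, hcomp] at hmis
  · intro h k hk h1 h2
    have hk2 : k < z.length := by simpa using hk
    simp only [List.getElem_map]
    cases hb : (z[k].1 == z[k].2) with
    | true => rfl
    | false =>
      have hmis : (z[k].1 != z[k].2) = true := by simp [bne, hb]
      have hc := h _ ((pvMem_cands z _ _).mpr ⟨k, hk2, hmis, rfl⟩)
      simp only [List.length_map] at h2
      omega

-- all(comp_list) holds iff there is no candidate at all
lemma pvAllcomp_iff (z : List (Char × Char)) :
    ((z.map (fun p => p.1 == p.2)).all id = true) ↔ pvCands z (z.length : Int) 0 = [] := by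
  rw [List.all_eq_true]
  unfold pvCands
  rw [List.filterMap_eq_nil_iff]
  constructor
  · intro h p hp
    obtain ⟨k, hk, rfl⟩ := (PySem.List.mem_enumerate_iff _ _ _).mp hp
    have hx := h _ (List.mem_map_of_mem (List.getElem_mem hk))
    simp only [id] at hx
    simp only [bne, hx, Bool.not_true]
    rfl
  · intro h x hx
    obtain ⟨p, hp, rfl⟩ := List.mem_map.mp hx
    obtain ⟨k, hk, rfl⟩ := List.mem_iff_getElem.mp hp
    have hn := h (0 + (k : Int), z[k]) ((PySem.List.mem_enumerate_iff _ _ _).mpr ⟨k, hk, rfl⟩)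
    by_cases hb : (z[k].1 != z[k].2) = true
    · simp [hb] at hn
    · simp only [id]
      cases hbb : (z[k].1 == z[k].2) with
      | true => rfl
      | false => exact absurd (by simp [bne, hbb]) hb

lemma pvCands_ge_one (z : List (Char × Char)) (c : Int) (hc : c ∈ pvCands z (z.length : Int) 0) : 1 ≤ c := by
  rw [pvMem_cands] at hc
  obtain ⟨k, hk, _, rfl⟩ := hc
  omega

lemma pvLoopA_eq (t : List Char) (comp : List Bool) (k0 : Int)
    (hP : ∀ r : Int, 1 ≤ r → ((PySem.List.slice comp (some r) (some (-r))).all id = true ↔ k0 ≤ r)) :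
    ∀ (n : Nat) (a b : Int), (b - a).toNat = n → 1 ≤ a → a ≤ k0 →
      pvLoopA t comp (PySem.List.pyRange a b 1)
        = if k0 < b then String.ofList (PySem.List.slice t (some k0) (some (-k0))) else "" := by
  intro n
  induction n with
  | zero =>
    intro a b hn h1 h2
    rw [PySem.List.pyRange_one_eq_nil (by omega)]
    simp only [pvLoopA]
    rw [if_neg (by omega)]
  | succ n ih =>
    intro a b hn h1 h2
    by_cases hab : a < b
    · rw [PySem.List.pyRange_one_cons hab]
      simp only [pvLoopA]
      by_cases hk : k0 ≤ a
      · have ha : a = k0 := by omega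
        rw [if_pos (by rw [hP a h1]; omega)]
        rw [if_pos (by omega), ha]
      · rw [if_neg (by rw [hP a h1]; omega)]
        exact ih (a + 1) b (by omega) (by omega) (by omega)
    · rw [PySem.List.pyRange_one_eq_nil (by omega)]
      simp only [pvLoopA]
      rw [if_neg (by omega)]

-- the two cores agree
set_option maxHeartbeats 400000 in
lemma pvCore_eq (t u : List Char) : pvAcore t u = pvBcore t u := by
  unfold pvAcore pvBcore
  have hm : ((min t.length u.length : Nat) : Int) = (((t.zip u).length : Nat) : Int) := by
    simp
  rw [hm]
  set z := t.zip u with hz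
  have hcomplen : (z.map (fun p => p.1 == p.2)).length = z.length := by simp
  dsimp only
  rw [pvFold_eq_max, hcomplen]
  set C := pvCands z ((z.length : Nat) : Int) 0 with hC
  set k0 := C.foldl max 0 with hk0
  have hle : ∀ K : Int, k0 ≤ K ↔ 0 ≤ K ∧ ∀ c ∈ C, c ≤ K := fun K => pvFoldMax_le_iff C 0 K
  have hk0pos : 0 ≤ k0 := ((hle k0).mp le_rfl).1
  by_cases hall : ((z.map (fun p => p.1 == p.2)).all id) = true
  · have hnil : C = [] := by rw [hC]; exact (pvAllcomp_iff z).mp hall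
    have hz0 : k0 = 0 := by rw [hk0, hnil]; rfl
    rw [if_pos hall, if_pos hz0]
  · have hnonnil : C ≠ [] := by
      intro hn
      exact hall ((pvAllcomp_iff z).mpr (by rw [← hC]; exact hn))
    have hk1 : 1 ≤ k0 := by
      by_contra hlt
      obtain ⟨c, hc⟩ := List.exists_mem_of_ne_nil C hnonnil
      have h1 := pvCands_ge_one z c (by rw [hC] at hc; exact hc)
      have h2 := ((hle 0).mp (by omega)).2 c hc
      omega
    have hP : ∀ r : Int, 1 ≤ r →
        (((PySem.List.slice (z.map (fun p => p.1 == p.2)) (some r) (some (-r))).all id = true) ↔ k0 ≤ r) := by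
      intro r hr
      have hrn : r = ((r.toNat : Nat) : Int) := by omega
      rw [hrn, pvP_iff z r.toNat (by omega), hle]
      constructor
      · intro hc
        exact ⟨by omega, by rw [hC]; exact hc⟩
      · rintro ⟨-, hc⟩
        rw [hC] at hc
        exact hc
    rw [if_neg hall]
    set Bnd : Int := PySem.Int.floordiv ((z.length : Nat) : Int) 2 + PySem.Int.mod ((z.length : Nat) : Int) 2 with hBnd
    have hBndval : Bnd = ((z.length : Nat) : Int) / 2 + ((z.length : Nat) : Int) % 2 := by
      rw [hBnd, PySem.Int.floordiv_eq_ediv_of_pos (by omega), PySem.Int.mod_eq_emod_of_pos (by omega)]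
    have hzlen : z.length ≤ t.length := by
      rw [hz]
      simp
    generalize hG : z.map (fun p => p.1 == p.2) = comp at hP ⊢
    have hloop := pvLoopA_eq t comp k0 hP (Bnd - 1).toNat 1 Bnd rfl le_rfl hk1
    rw [hloop]
    rw [if_neg (by omega : ¬ k0 = 0)]
    by_cases hcut : k0 < Bnd
    · rw [if_pos hcut, if_pos hcut]
      congr 1
      have hkt : k0 ≤ (t.length : Int) := by omega
      have hrn : k0 = ((k0.toNat : Nat) : Int) := by omega
      rw [hrn, pvSlice_pos_neg t k0.toNat (by omega),
        PySem.List.slice_toNat t (a := ((k0.toNat : Nat) : Int))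
          (b := (((t.length : Nat) : Int) - ((k0.toNat : Nat) : Int))) (by omega) (by omega)]
      congr 1
      omega
    · rw [if_neg hcut, if_neg hcut]

theorem longest_for_offset_spec : Claim_equal_longest_for_offset := by
  intro s s_inv offset _
  unfold Spec_longest_for_offset longest_for_offset longest_for_offset_alt
  by_cases h : offset ≥ 0 <;> simp only [h, if_true, if_false, pvCore_eq]
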